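-- pv_equiv track=rewrite | github.com/Checkmk/checkmk | cmk/base/legacy_checks/unitrends_replication.py | check_unitrends_replication
-- ===== SOURCE A (Python) =====
-- def check_unitrends_replication(item, _no_params, info):
--     # this never gone be a blessed check :)
--     replications = [x for x in info if x[3] == item]
--     if len(replications) == 0:
--         return 3, "No Entries found"
--     not_successfull = [x for x in replications if x[1] != "Success"]
--     if len(not_successfull) == 0:
--         return 0, "All Replications in the last 24 hours Successfull"
--     messages = []
--     for _application, result, _complete, target, instance in not_successfull:
--         messages.append(f"Target: {target}, Result: {result}, Instance: {instance}  ")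
--     # TODO: Maybe a good place to use multiline output here
--     return 2, "Errors from the last 24 hours: " + "/ ".join(messages)
-- ===== SOURCE B (Python) =====
-- def check_unitrends_replication(item, _no_params, info):
--     # Walk the table back-to-front, assembling the joined error report directly
--     # (separator handled inline), so no intermediate message list and no join().
--     matched = False
--     report = None
--     for row in reversed(info):
--         if row[3] == item:
--             matched = True
--             if row[1] != "Success":
--                 msg = f"Target: {row[3]}, Result: {row[1]}, Instance: {row[4]}  "
--                 report = msg if report is None else msg + "/ " + report
--     if not matched:
--         return 3, "No Entries found"
--     if report is None:
--         return 0, "All Replications in the last 24 hours Successfull"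
--     return 2, "Errors from the last 24 hours: " + report
-- ===== Notes on version B (the rewrite author's own statement) =====
-- stated objective: alternative
-- what changed: B traverses info in reverse and assembles the joined error report string directly back-to-front with the '/ ' separator handled inline, maintaining only a matched flag and an optional report string, instead of A's two staged filtered comprehensions plus a formatting loop and a final join.
import Mathlib
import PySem

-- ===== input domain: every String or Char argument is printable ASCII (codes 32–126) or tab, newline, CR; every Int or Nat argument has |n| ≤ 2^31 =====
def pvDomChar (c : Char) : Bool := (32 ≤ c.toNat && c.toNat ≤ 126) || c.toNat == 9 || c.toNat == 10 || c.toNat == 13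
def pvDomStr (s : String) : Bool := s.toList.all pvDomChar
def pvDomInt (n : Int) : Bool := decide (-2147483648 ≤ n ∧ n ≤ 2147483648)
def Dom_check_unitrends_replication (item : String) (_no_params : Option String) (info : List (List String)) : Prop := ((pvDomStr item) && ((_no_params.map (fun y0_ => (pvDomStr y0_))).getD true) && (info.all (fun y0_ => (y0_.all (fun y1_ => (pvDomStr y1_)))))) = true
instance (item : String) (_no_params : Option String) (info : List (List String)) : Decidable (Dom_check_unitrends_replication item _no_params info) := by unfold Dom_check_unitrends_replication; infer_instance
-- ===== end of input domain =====

-- B walks the table in reverse and assembles the joined error report string directly,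
-- separator handled inline, keeping only a matched flag and an optional report (alternative).

-- shared row formatter: "Target: {row[3]}, Result: {row[1]}, Instance: {row[4]}  "
-- (row.getD i "" is exact under Pre_, which guarantees the accessed indices exist)
def pvMsg (x : List String) : String :=
  "Target: " ++ x.getD 3 "" ++ ", Result: " ++ x.getD 1 "" ++ ", Instance: " ++ x.getD 4 "" ++ "  "

-- ===== PORT A =====
def check_unitrends_replication (item : String) (_no_params : Option String) (info : List (List String)) : Int × String :=
  let replications := info.filter (fun x => x.getD 3 "" == item)
  if replications.length == 0 then (3, "No Entries found")
  else
    let not_successfull := replications.filter (fun x => x.getD 1 "" != "Success")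
    if not_successfull.length == 0 then (0, "All Replications in the last 24 hours Successfull")
    else
      let messages := not_successfull.map pvMsg
      (2, "Errors from the last 24 hours: " ++ PySem.Str.join "/ " messages)

-- ===== PORT B =====
def check_unitrends_replication_alt (item : String) (_no_params : Option String) (info : List (List String)) : Int × String :=
  let st := info.reverse.foldl (fun (st : Bool × Option String) row =>
    if row.getD 3 "" == item then
      (true,
        if row.getD 1 "" != "Success" then
          some (match st.2 with
                | none => pvMsg row
                | some t => pvMsg row ++ "/ " ++ t)
        else st.2)
    else st) (false, none)
  if !st.1 then (3, "No Entries found")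
  else
    match st.2 with
    | none => (0, "All Replications in the last 24 hours Successfull")
    | some report => (2, "Errors from the last 24 hours: " ++ report)

-- ===== PRECONDITION & SPEC =====
-- Pre_ excludes exactly the malformed agent rows on which A raises: IndexError on a row
-- shorter than 4 entries, ValueError (unpacking) on a matching non-"Success" row whose length is not 5.
def Pre_check_unitrends_replication (item : String) (_no_params : Option String) (info : List (List String)) : Prop :=
  ∀ row ∈ info, 4 ≤ row.length ∧ (row.getD 3 "" = item ∧ row.getD 1 "" ≠ "Success" → row.length = 5)
instance (item : String) (_no_params : Option String) (info : List (List String)) : Decidable (Pre_check_unitrends_replication item _no_params info) := by unfold Pre_check_unitrends_replication; infer_instance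
def pvWitness_check_unitrends_replication : String × Option String × List (List String) :=
  ("x", none, [["a", "Fail", "c", "x", "i"], ["a", "Success", "c", "y", "j"]])

def Spec_check_unitrends_replication (item : String) (_no_params : Option String) (info : List (List String)) (out : Int × String) : Prop := out = check_unitrends_replication_alt item _no_params info
instance (item : String) (_no_params : Option String) (info : List (List String)) (out : Int × String) : Decidable (Spec_check_unitrends_replication item _no_params info out) := by unfold Spec_check_unitrends_replication; infer_instance

-- ===== CLAIM (what is proved, stated in full; the proofs are below) =====
def Claim_equal_check_unitrends_replication : Prop := ∀ (item : String) (_no_params : Option String) (info : List (List String)), Dom_check_unitrends_replication item _no_params info → Pre_check_unitrends_replication item _no_params info → Spec_check_unitrends_replication item _no_params info (check_unitrends_replication item _no_params info)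

-- ===== LEMMAS AND PROOFS =====

-- the optional report B maintains equals join "/ " of the message list ('none' for [])
def pvJoinOpt (ms : List String) : Option String :=
  match ms with
  | [] => none
  | _ => some (PySem.Str.join "/ " ms)

lemma pvJoinOpt_cons (m : String) (ms : List String) :
    pvJoinOpt (m :: ms) = some (match pvJoinOpt ms with
                                | none => m
                                | some t => m ++ "/ " ++ t) := by
  cases ms with
  | nil => simp [pvJoinOpt, PySem.Str.join, PySem.Chars.join_singleton]
  | cons b rest =>
    simp only [pvJoinOpt]
    congr 1
    simp [PySem.Str.join, PySem.Chars.join_cons_cons]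
    rw [show ('/' :: ' ' :: PySem.Chars.join ['/', ' '] (b.toList :: List.map String.toList rest)) = "/ ".toList ++ PySem.Chars.join ['/', ' '] (b.toList :: List.map String.toList rest) from rfl]
    rw [String.ofList_append]
    simp [String.append_assoc]

lemma pvJoinOpt_ne_nil (ms : List String) (h : ms ≠ []) :
    pvJoinOpt ms = some (PySem.Str.join "/ " ms) := by
  cases ms with
  | nil => exact absurd rfl h
  | cons b rest => rfl

-- B's reverse fold computes A's matched flag and the joined message report
lemma foldl_inv (item : String) (info : List (List String)) :
    info.reverse.foldl (fun (st : Bool × Option String) row =>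
      if row.getD 3 "" == item then
        (true,
          if row.getD 1 "" != "Success" then
            some (match st.2 with
                  | none => pvMsg row
                  | some t => pvMsg row ++ "/ " ++ t)
          else st.2)
      else st) (false, none) =
    (info.any (fun r => r.getD 3 "" == item),
     pvJoinOpt (((info.filter (fun x => x.getD 3 "" == item)).filter (fun x => x.getD 1 "" != "Success")).map pvMsg)) := by
  rw [List.foldl_reverse]
  induction info with
  | nil => simp [pvJoinOpt]
  | cons r rest ih =>
    rw [List.foldr_cons, ih]
    by_cases h3 : r.getD 3 "" = item
    · by_cases h1 : r.getD 1 "" = "Success"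
      · rw [if_pos (by simpa using h3)]
        simp only [List.getD_eq_getElem?_getD] at h3 h1
        simp [h3, h1]
      · rw [if_pos (by simpa using h3)]
        simp only [List.getD_eq_getElem?_getD] at h3 h1
        simp only [List.filter_cons]
        simp [h3, h1, pvJoinOpt_cons]
    · rw [if_neg (by simpa using h3)]
      simp only [List.getD_eq_getElem?_getD] at h3
      simp [h3]

-- ===== VERDICT (by name: the statement is the Claim_ definition above) =====
theorem check_unitrends_replication_spec : Claim_equal_check_unitrends_replication := by
  intro item _no_params info _ _
  unfold Spec_check_unitrends_replication check_unitrends_replication check_unitrends_replication_alt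
  rw [foldl_inv]
  dsimp only
  by_cases hrep : info.filter (fun x => x.getD 3 "" == item) = []
  · have hm : info.any (fun r => r.getD 3 "" == item) = false := by
      rw [List.any_eq_false]
      intro r hr
      simpa using List.filter_eq_nil_iff.mp hrep r hr
    rw [hrep, hm]
    rfl
  · have hm : info.any (fun r => r.getD 3 "" == item) = true := by
      rw [List.any_eq_true]
      rcases List.exists_mem_of_ne_nil _ hrep with ⟨r, hr⟩
      obtain ⟨h1, h2⟩ := List.mem_filter.mp hr
      exact ⟨r, h1, h2⟩
    have hlen : ((info.filter (fun x => x.getD 3 "" == item)).length == 0) = false := by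
      simpa [List.length_eq_zero_iff] using hrep
    rw [hm, hlen]
    simp only [Bool.not_true, Bool.false_eq_true, if_false]
    by_cases hns : (info.filter (fun x => x.getD 3 "" == item)).filter (fun x => x.getD 1 "" != "Success") = []
    · rw [hns]
      rfl
    · have hnlen : (((info.filter (fun x => x.getD 3 "" == item)).filter (fun x => x.getD 1 "" != "Success")).length == 0) = false := by
        simpa [List.length_eq_zero_iff] using hns
      have hM : ((info.filter (fun x => x.getD 3 "" == item)).filter (fun x => x.getD 1 "" != "Success")).map pvMsg ≠ [] := by
        simpa using hns
      rw [hnlen, pvJoinOpt_ne_nil _ hM]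
      rfl
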